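-- pv_equiv track=rewrite | github.com/nannaberg/adventofcode | 2023/1/do.py | get_word_indices
-- ===== SOURCE A (Python) =====
-- def get_word_indices(line):
--     digits = ["one", "two", "three", "four", "five", "six", "seven", "eight", "nine"]
--     word_list = []
--     for i,k in enumerate(digits):
--         index = 0
--         while index < len(line):
--             index = line.find(k, index)
--             if index == -1:
--                 break
--             word_list.append((index, str(i+1)))
--             index += len(k)
--     return word_list
-- ===== SOURCE B (Python) =====
-- def get_word_indices(line):
--     words = ["one", "two", "three", "four", "five", "six", "seven", "eight", "nine"]
--     hits = []
--     for i in range(len(line)):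
--         for v, w in enumerate(words, 1):
--             if line.startswith(w, i):
--                 hits.append((i, v))
--     return [(i, str(v)) for v in range(1, 10) for (i, u) in hits if u == v]
-- ===== Notes on version B (the rewrite author's own statement) =====
-- stated objective: alternative
-- what changed: Replaces A's per-word find()-and-skip rescans of the line (9 separate scan loops) by one left-to-right pass over positions collecting every (position, digit) match via startswith, followed by grouping the hits digit by digit; correctness relies on the digit words having no self-overlap.
import Mathlib
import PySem

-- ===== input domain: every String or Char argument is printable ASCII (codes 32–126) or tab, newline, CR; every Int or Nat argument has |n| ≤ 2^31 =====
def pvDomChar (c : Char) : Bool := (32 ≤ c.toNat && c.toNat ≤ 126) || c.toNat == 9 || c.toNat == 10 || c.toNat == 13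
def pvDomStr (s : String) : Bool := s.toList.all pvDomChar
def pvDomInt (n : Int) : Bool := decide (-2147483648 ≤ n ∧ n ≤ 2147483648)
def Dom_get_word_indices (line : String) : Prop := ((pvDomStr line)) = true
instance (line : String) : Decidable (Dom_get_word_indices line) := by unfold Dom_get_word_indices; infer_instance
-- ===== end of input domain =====

-- B replaces A's nine find()-and-skip scan loops by one pass over all positions collecting
-- (position, digit) matches, then groups the hits digit by digit (objective: alternative).

-- ===== PORT A =====
-- digits = ["one", ..., "nine"]
def pvDigitsA : List String := ["one", "two", "three", "four", "five", "six", "seven", "eight", "nine"]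

-- the inner 'while index < len(line)' loop of A; fuel (len(line)+1) only makes the
-- recursion structural — index grows by at least 1 per iteration, so it never runs out
def pvFindLoop (line k d : String) : Nat → Int → List (Int × String) → List (Int × String)
  | 0, _, acc => acc
  | fuel + 1, index, acc =>
    if index < PySem.Str.len line then
      let j := PySem.Str.findFrom line k index
      if j = -1 then acc
      else pvFindLoop line k d fuel (j + PySem.Str.len k) (acc ++ [(j, d)])
    else acc

def get_word_indices (line : String) : List (Int × String) :=
  (PySem.List.enumerate pvDigitsA).foldl
    (fun acc ik => pvFindLoop line ik.2 (PySem.Int.toStr (ik.1 + 1)) (line.toList.length + 1) 0 acc) []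

-- ===== PORT B =====
def pvWordsB : List String := ["one", "two", "three", "four", "five", "six", "seven", "eight", "nine"]

-- line.startswith(w, i) with 0 ≤ i is ported exactly as line[i:].startswith(w)
def get_word_indices_alt (line : String) : List (Int × String) :=
  let hits : List (Int × Int) :=
    (PySem.List.pyRange 0 (PySem.Str.len line) 1).foldl (fun acc i =>
      (PySem.List.enumerate pvWordsB 1).foldl (fun acc2 vw =>
        if PySem.Str.startswith (PySem.Str.slice line (some i) none) vw.2 then acc2 ++ [(i, vw.1)]
        else acc2) acc) []
  (PySem.List.pyRange 1 10 1).flatMap (fun v =>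
    (hits.filter (fun p => p.2 == v)).map (fun p => (p.1, PySem.Int.toStr v)))

-- ===== PRECONDITION & SPEC =====
def Spec_get_word_indices (line : String) (out : List (Int × String)) : Prop := out = get_word_indices_alt line
instance (line : String) (out : List (Int × String)) : Decidable (Spec_get_word_indices line out) := by unfold Spec_get_word_indices; infer_instance

-- ===== CLAIM (what is proved, stated in full; the proofs are below) =====
def Claim_equal_get_word_indices : Prop := ∀ (line : String), Dom_get_word_indices line → Spec_get_word_indices line (get_word_indices line)

-- ===== LEMMAS AND PROOFS =====

-- ascending list of all occurrence positions ≥ k of w in L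
def pvOcc (L w : List Char) (k : Nat) : List Nat :=
  if _h : k < L.length then
    (if PySem.Chars.startswith (L.drop k) w then k :: pvOcc L w (k + 1) else pvOcc L w (k + 1))
  else []
termination_by L.length - k

-- w has no nonempty proper border (no self-overlap)
def pvBorderFree (w : List Char) : Bool :=
  (List.range w.length).all (fun j => j == 0 || !((w.drop j).isPrefixOf w))

theorem pvOcc_ge (L w : List Char) (k : Nat) (h : L.length ≤ k) : pvOcc L w k = [] := by
  unfold pvOcc; rw [dif_neg (by omega)]

theorem pvOcc_congr (L w : List Char) (a b : Nat) (hab : a ≤ b)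
    (h : ∀ j, a ≤ j → j < b → ¬ w <+: L.drop j) : pvOcc L w a = pvOcc L w b := by
  obtain ⟨n, hn⟩ : ∃ n, b - a = n := ⟨_, rfl⟩
  induction n generalizing a with
  | zero => rw [show a = b by omega]
  | succ n ih =>
    have hab' : a < b := by omega
    by_cases hL : a < L.length
    · have hpa : ¬ w <+: L.drop a := h a le_rfl hab'
      rw [pvOcc, dif_pos hL, if_neg (by simpa [PySem.Chars.startswith_iff] using hpa)]
      exact ih (a + 1) (by omega) (fun j hj1 hj2 => h j (by omega) hj2) (by omega)
    · rw [pvOcc_ge L w a (by omega), pvOcc_ge L w b (by omega)]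

theorem pv_sparse (L w : List Char) (r : Nat) (hbf : pvBorderFree w = true)
    (hr : w <+: L.drop r) : ∀ j, r < j → j < r + w.length → ¬ w <+: L.drop j := by
  intro j hj1 hj2 hpj
  obtain ⟨rest, hrest⟩ := hr
  have hdj : L.drop j = w.drop (j - r) ++ rest := by
    have h1 : L.drop j = (L.drop r).drop (j - r) := by rw [List.drop_drop]; congr 1; omega
    rw [h1, ← hrest, List.drop_append_of_le_length (by omega)]
  have h2 : w.drop (j - r) <+: w := by
    have hw1 : w <+: w.drop (j - r) ++ rest := hdj ▸ hpj
    have hw2 : w.drop (j - r) <+: w.drop (j - r) ++ rest := List.prefix_append _ _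
    rcases List.prefix_or_prefix_of_prefix hw2 hw1 with h | h
    · exact h
    · exfalso
      have := h.length_le
      have hlen : (w.drop (j - r)).length = w.length - (j - r) := by simp
      omega
  have hbf' := (List.all_eq_true.mp hbf) (j - r) (List.mem_range.mpr (by omega))
  simp only [Bool.or_eq_true, beq_iff_eq, Bool.not_eq_true'] at hbf'
  rcases hbf' with h | h
  · omega
  · rw [← List.isPrefixOf_iff_prefix] at h2
    simp [h2] at h

theorem pvFindLoop_eq (line kstr d : String) (hw : kstr.toList ≠ [])
    (hbf : pvBorderFree kstr.toList = true) :
    ∀ (fuel : Nat) (k : Nat) (acc : List (Int × String)), k ≤ line.toList.length →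
      line.toList.length + 1 ≤ fuel + k →
      pvFindLoop line kstr d fuel (k : Int) acc
        = acc ++ (pvOcc line.toList kstr.toList k).map (fun r => ((r : Int), d)) := by
  intro fuel
  induction fuel with
  | zero => intro k acc h1 h2; omega
  | succ fuel ih =>
    intro k acc hk hfuel
    rw [pvFindLoop]
    by_cases hkL : k < line.toList.length
    · rw [if_pos (by simp only [PySem.Str.len_eq]; exact_mod_cast hkL)]
      simp only [PySem.Str.findFrom_eq]
      by_cases hj : PySem.Chars.findFrom line.toList kstr.toList (k : Int) = -1
      · rw [if_pos hj]
        have hninf := (PySem.Chars.findFrom_natCast_eq_neg_one_iff line.toList kstr.toList k hk).mp hj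
        have hnone : ∀ j, k ≤ j → j < line.toList.length → ¬ kstr.toList <+: line.toList.drop j := by
          intro j hj1 _ hp
          apply hninf
          rw [← PySem.Chars.isIn_iff_infix, ← PySem.Chars.exists_prefix_drop_iff_isIn]
          refine ⟨j - k, ?_⟩
          rwa [List.drop_drop, show k + (j - k) = j by omega]
        rw [pvOcc_congr line.toList kstr.toList k line.toList.length (by omega) hnone,
          pvOcc_ge _ _ _ le_rfl]
        simp
      · rw [if_neg hj]
        obtain ⟨hkj, hpre, hmin⟩ :=
          PySem.Chars.findFrom_natCast_spec line.toList kstr.toList k hk hj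
        have h0j : (0 : Int) ≤ PySem.Chars.findFrom line.toList kstr.toList (k : Int) :=
          le_trans (by exact_mod_cast Int.natCast_nonneg k) hkj
        set r := (PySem.Chars.findFrom line.toList kstr.toList (k : Int)).toNat with hr
        have hjr : PySem.Chars.findFrom line.toList kstr.toList (k : Int) = (r : Int) := by omega
        have hwpos : 0 < kstr.toList.length := List.length_pos_iff.mpr hw
        have hrw : kstr.toList.length ≤ line.toList.length - r := by
          have := hpre.length_le
          simpa using this
        have hrlen : r + kstr.toList.length ≤ line.toList.length := by omega
        have hocc : pvOcc line.toList kstr.toList k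
            = r :: pvOcc line.toList kstr.toList (r + kstr.toList.length) := by
          rw [pvOcc_congr line.toList kstr.toList k r (by omega) (fun j hj1 hj2 => hmin j hj1 hj2)]
          rw [pvOcc, dif_pos (by omega),
            if_pos (by simpa [PySem.Chars.startswith_iff] using hpre)]
          congr 1
          exact pvOcc_congr line.toList kstr.toList (r + 1) (r + kstr.toList.length) (by omega)
            (fun j hj1 hj2 => pv_sparse line.toList kstr.toList r hbf hpre j (by omega) (by omega))
        have hcast : ((r : Int)) + PySem.Str.len kstr = ((r + kstr.toList.length : Nat) : Int) := by
          simp only [PySem.Str.len_eq]; push_cast; ring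
        rw [hjr, hcast, ih (r + kstr.toList.length) (acc ++ [((r : Int), d)]) (by omega) (by omega),
          hocc]
        simp
    · rw [if_neg (by simp only [PySem.Str.len_eq]; exact_mod_cast hkL)]
      rw [pvOcc_ge _ _ _ (by omega)]
      simp

theorem pvHits_eq (line wstr d : String) :
    ∀ (k : Nat), k ≤ line.toList.length →
      (PySem.List.pyRange (k : Int) (line.toList.length : Int) 1).flatMap
          (fun i => if PySem.Str.startswith (PySem.Str.slice line (some i) none) wstr
                    then [(i, d)] else [])
        = (pvOcc line.toList wstr.toList k).map (fun r => ((r : Int), d)) := by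
  intro k
  obtain ⟨n, hn⟩ : ∃ n, line.toList.length - k = n := ⟨_, rfl⟩
  induction n generalizing k with
  | zero =>
    intro hk
    rw [PySem.List.pyRange_one_eq_nil (by exact_mod_cast (by omega : line.toList.length ≤ k)),
      pvOcc_ge _ _ _ (by omega)]
    simp
  | succ n ih =>
    intro hk
    have hkL : k < line.toList.length := by omega
    rw [PySem.List.pyRange_one_cons (by exact_mod_cast hkL), List.flatMap_cons]
    have hsw : PySem.Str.startswith (PySem.Str.slice line (some (k : Int)) none) wstr
        = PySem.Chars.startswith (line.toList.drop k) wstr.toList := by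
      simp [PySem.Str.startswith_eq, PySem.Str.toList_slice]
    have hnext : ((k : Int) + 1) = ((k + 1 : Nat) : Int) := by push_cast; ring
    rw [hsw, hnext, pvOcc, dif_pos hkL, ih (k + 1) (by omega) (by omega)]
    by_cases hc : PySem.Chars.startswith (line.toList.drop k) wstr.toList = true
    · rw [if_pos hc, if_pos hc]; simp
    · rw [if_neg hc, if_neg hc]; simp

-- ===== VERDICT (by name: the statement is the Claim_ definition above) =====
theorem get_word_indices_spec : Claim_equal_get_word_indices := by
  unfold Claim_equal_get_word_indices Spec_get_word_indices
  intro line _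
  have hA : ∀ (kstr : String), kstr.toList ≠ [] → pvBorderFree kstr.toList = true →
      ∀ (d : String) (acc : List (Int × String)),
      pvFindLoop line kstr d (line.length + 1) 0 acc
        = acc ++ (pvOcc line.toList kstr.toList 0).map (fun r => ((r : Int), d)) := by
    intro kstr hw hbf d acc
    have h := pvFindLoop_eq line kstr d hw hbf (line.toList.length + 1) 0 acc (by omega) (by omega)
    simpa using h
  simp only [get_word_indices, pvDigitsA, PySem.List.enumerate_cons, PySem.List.enumerate_nil,
    List.foldl_cons, List.foldl_nil]
  norm_num
  rw [hA "one" (by decide) (by decide), hA "two" (by decide) (by decide),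
    hA "three" (by decide) (by decide), hA "four" (by decide) (by decide),
    hA "five" (by decide) (by decide), hA "six" (by decide) (by decide),
    hA "seven" (by decide) (by decide), hA "eight" (by decide) (by decide),
    hA "nine" (by decide) (by decide)]
  have h9 : PySem.List.pyRange 1 10 1 = [1, 2, 3, 4, 5, 6, 7, 8, 9] := by decide
  simp only [get_word_indices_alt, pvWordsB, PySem.List.enumerate_cons, PySem.List.enumerate_nil,
    PySem.List.foldl_append_if, PySem.List.foldl_append_eq_flatMap, h9,
    List.flatMap_cons, List.flatMap_nil]
  norm_num
  simp only [List.filter_flatMap, List.filter_map, Function.comp_def, List.filter_filter]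
  norm_num [List.filter_cons, List.filter_nil]
  have hB : ∀ (wstr d : String),
      List.flatMap (fun i =>
          if PySem.Chars.startswith (PySem.List.slice line.toList (some i) none) wstr.toList = true
          then [(i, d)] else []) (PySem.List.pyRange 0 (line.length : Int) 1)
        = (pvOcc line.toList wstr.toList 0).map (fun r => ((r : Int), d)) := by
    intro wstr d
    have h := pvHits_eq line wstr d 0 (by omega)
    simpa using h
  simp only [List.map_flatMap, apply_ite, List.map_cons, List.map_nil]
  rw [hB "one" (PySem.Int.toStr 1), hB "two" (PySem.Int.toStr 2), hB "three" (PySem.Int.toStr 3),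
    hB "four" (PySem.Int.toStr 4), hB "five" (PySem.Int.toStr 5), hB "six" (PySem.Int.toStr 6),
    hB "seven" (PySem.Int.toStr 7), hB "eight" (PySem.Int.toStr 8), hB "nine" (PySem.Int.toStr 9)]
  simp [List.map_flatMap]
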